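-- pv_equiv track=rewrite | github.com/rakhat-maksat/TSIS | tsis4/game.py | safe_start
-- ===== SOURCE A (Python) =====
-- COLS       = 30
--
-- ROWS       = 28
--
-- def safe_start(walls):
--     for dc in range(COLS // 2):
--         col = COLS // 2 + dc
--         row = ROWS // 2
--         candidates = [(col - i, row) for i in range(3)]
--         if all(c not in walls for c in candidates):
--             return candidates
--     return [(3, 1), (2, 1), (1, 1)]
-- ===== SOURCE B (Python) =====
-- COLS = 30
--
-- ROWS = 28
--
-- def safe_start(walls):
--     row = ROWS // 2
--     # wall-driven: each wall in the middle row knocks out the (up to 3) windows it blocks;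
--     # the answer is the leftmost surviving window column
--     ok = set(range(COLS // 2, COLS))
--     for (c, r) in walls:
--         if r == row:
--             ok -= {c, c + 1, c + 2}
--     if ok:
--         col = min(ok)
--         return [(col, row), (col - 1, row), (col - 2, row)]
--     return [(3, 1), (2, 1), (1, 1)]
-- ===== Notes on version B (the rewrite author's own statement) =====
-- stated objective: alternative
-- what changed: A scans candidate windows left to right, rebuilding the 3-cell candidate list and testing each cell against walls until a window passes; B inverts the traversal: a single pass over the walls knocks the (up to 3) window columns each middle-row wall blocks out of a set of all window columns, then returns the window at the minimum surviving column, with the same fallback.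
import Mathlib
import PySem

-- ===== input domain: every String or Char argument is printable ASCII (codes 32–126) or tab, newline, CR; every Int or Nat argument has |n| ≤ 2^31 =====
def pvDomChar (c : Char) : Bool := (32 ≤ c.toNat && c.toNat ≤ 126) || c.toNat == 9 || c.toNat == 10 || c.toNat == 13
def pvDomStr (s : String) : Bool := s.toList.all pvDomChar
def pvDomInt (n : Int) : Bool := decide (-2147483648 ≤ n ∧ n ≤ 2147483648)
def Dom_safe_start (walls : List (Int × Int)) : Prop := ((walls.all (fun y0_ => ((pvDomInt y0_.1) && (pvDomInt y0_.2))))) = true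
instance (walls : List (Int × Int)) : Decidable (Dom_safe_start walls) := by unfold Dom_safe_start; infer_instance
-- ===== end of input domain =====

-- B inverts A's traversal: instead of scanning candidate windows and testing each cell against the
-- walls, one pass over the walls removes the (up to 3) window columns each middle-row wall blocks
-- from a set of all window columns, and the leftmost surviving column wins (objective: alternative).

-- ===== PORT A =====
-- the for-loop with early return, as recursion over the list range(COLS // 2)
def goA (walls : List (Int × Int)) : List Int → List (Int × Int)
  | [] => [(3, 1), (2, 1), (1, 1)]
  | dc :: rest =>
    let col : Int := PySem.Int.floordiv 30 2 + dc
    let row : Int := PySem.Int.floordiv 28 2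
    let candidates := (PySem.List.pyRange 0 3 1).map (fun i => (col - i, row))
    if candidates.all (fun c => !(walls.contains c)) then candidates
    else goA walls rest

def safe_start (walls : List (Int × Int)) : List (Int × Int) :=
  goA walls (PySem.List.pyRange 0 (PySem.Int.floordiv 30 2) 1)

-- ===== PORT B =====
-- min(ok) over a set without a key is order-independent, ported as PySem.List.min? on the set's
-- element list; Python's 'if ok: … min(ok) … else fallback' is the match on min? (none iff ok empty)
def safe_start_alt (walls : List (Int × Int)) : List (Int × Int) :=
  let row : Int := PySem.Int.floordiv 28 2
  let ok0 : PySem.Set Int := PySem.Set.ofList (PySem.List.pyRange (PySem.Int.floordiv 30 2) 30 1)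
  let ok : PySem.Set Int := walls.foldl
    (fun s p => if p.2 == row then PySem.Set.diff s (PySem.Set.ofList [p.1, p.1 + 1, p.1 + 2]) else s) ok0
  match PySem.List.min? ok (fun x => x) with
  | some col => [(col, row), (col - 1, row), (col - 2, row)]
  | none => [(3, 1), (2, 1), (1, 1)]

-- ===== PRECONDITION & SPEC =====
def Spec_safe_start (walls : List (Int × Int)) (out : List (Int × Int)) : Prop := out = safe_start_alt walls
instance (walls : List (Int × Int)) (out : List (Int × Int)) : Decidable (Spec_safe_start walls out) := by unfold Spec_safe_start; infer_instance

-- ===== CLAIM (what is proved, stated in full; the proofs are below) =====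
def Claim_equal_safe_start : Prop := ∀ (walls : List (Int × Int)), Dom_safe_start walls → Spec_safe_start walls (safe_start walls)

-- ===== LEMMAS AND PROOFS =====

-- a window column col survives iff no wall sits at (col,14), (col-1,14) or (col-2,14)
def pvKeep (walls : List (Int × Int)) (col : Int) : Bool :=
  walls.all (fun p => !(p.2 == (14 : Int) && (p.1 == col || p.1 + 1 == col || p.1 + 2 == col)))

-- B's wall-driven set-subtraction fold computes exactly the surviving-column filter
lemma fold_diff_filter (walls : List (Int × Int)) :
    ∀ s : List Int,
      walls.foldl (fun s p =>
        if p.2 == (14 : Int) then PySem.Set.diff s (PySem.Set.ofList [p.1, p.1 + 1, p.1 + 2]) else s) s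
      = s.filter (pvKeep walls) := by
  induction walls with
  | nil => intro s; exact (List.filter_eq_self.mpr (fun a _ => by simp [pvKeep])).symm
  | cons p ws ih =>
    intro s
    simp only [List.foldl_cons]
    rw [ih]
    by_cases hp : p.2 = 14
    · simp only [hp, beq_self_eq_true, if_true]
      show ((s.filter fun x => !(PySem.Set.contains (PySem.Set.ofList [p.1, p.1+1, p.1+2]) x)).filter (pvKeep ws)) = _
      rw [List.filter_filter]
      apply List.filter_congr
      intro x _
      rw [Bool.eq_iff_iff]
      simp [pvKeep, hp]
      tauto
    · have : (p.2 == (14 : Int)) = false := by simp [hp]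
      simp only [this]
      apply List.filter_congr
      intro x _
      simp [pvKeep, this]

-- A's 3-cell candidate test equals the survival predicate
lemma cond_eq (walls : List (Int × Int)) (col : Int) :
    (([(col, (14 : Int)), (col - 1, 14), (col - 2, 14)] : List (Int × Int)).all
      (fun c => !(walls.contains c))) = pvKeep walls col := by
  rw [Bool.eq_iff_iff]
  simp [pvKeep, List.all_eq_true]
  constructor
  · rintro ⟨h1, h2, h3⟩ a b hmem
    by_cases hb : b = 14
    · subst hb
      refine Or.inr ⟨⟨fun h => ?_, fun h => ?_⟩, fun h => ?_⟩
      · exact h1 (h ▸ hmem)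
      · have ha : a = col - 1 := by omega
        exact h2 (ha ▸ hmem)
      · have ha : a = col - 2 := by omega
        exact h3 (ha ▸ hmem)
    · exact Or.inl hb
  · intro h
    refine ⟨fun hm => ?_, fun hm => ?_, fun hm => ?_⟩
    · rcases h col 14 hm with hc | ⟨⟨hc, _⟩, _⟩
      · exact hc rfl
      · exact hc rfl
    · rcases h (col - 1) 14 hm with hc | ⟨⟨_, hc⟩, _⟩
      · exact hc rfl
      · exact hc (by omega)
    · rcases h (col - 2) 14 hm with hc | ⟨_, hc⟩
      · exact hc rfl
      · exact hc (by omega)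

-- A's first-success scan returns the window at the head of the surviving-column list
lemma goA_filter (walls : List (Int × Int)) :
    ∀ ds : List Int, goA walls ds =
      match ((ds.map (fun d => 15 + d)).filter (pvKeep walls)).head? with
      | some col => [(col, (14 : Int)), (col - 1, 14), (col - 2, 14)]
      | none => [(3, 1), (2, 1), (1, 1)] := by
  intro ds
  induction ds with
  | nil => rfl
  | cons d rest ih =>
    show (if _ then _ else goA walls rest) = _
    have h30 : PySem.Int.floordiv 30 2 = (15 : Int) := by decide
    have h28 : PySem.Int.floordiv 28 2 = (14 : Int) := by decide
    have h3 : PySem.List.pyRange 0 3 1 = [(0 : Int), 1, 2] := by decide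
    simp only [h30, h28, h3, List.map, List.map_cons, List.filter_cons, sub_zero]
    rw [cond_eq walls (15 + d)]
    by_cases hk : pvKeep walls (15 + d)
    · simp [hk]
    · simp only [Bool.not_eq_true] at hk
      simp [hk, ih]

lemma foldl_min_of_le (x : Int) : ∀ t : List Int, (∀ y ∈ t, x ≤ y) → t.foldl min x = x := by
  intro t
  induction t generalizing x with
  | nil => intro _; rfl
  | cons y t ih =>
    intro h
    simp only [List.foldl_cons]
    rw [min_eq_left (h y (List.mem_cons_self ..))]
    exact ih x fun z hz => h z (List.mem_cons_of_mem _ hz)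

-- min of a strictly increasing list is its head
lemma min?_of_pairwise_lt (l : List Int) (h : l.Pairwise (· < ·)) :
    PySem.List.min? l (fun x => x) = l.head? := by
  cases l with
  | nil => rfl
  | cons x t =>
    rw [PySem.List.min?_id_cons, List.head?_cons]
    have hp := List.pairwise_cons.mp h
    exact congrArg some (foldl_min_of_le x t fun y hy => le_of_lt (hp.1 y hy))

theorem safe_start_eq_alt (walls : List (Int × Int)) :
    safe_start walls = safe_start_alt walls := by
  have h30 : PySem.Int.floordiv 30 2 = (15 : Int) := by decide
  have h28 : PySem.Int.floordiv 28 2 = (14 : Int) := by decide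
  have hof : PySem.Set.ofList (PySem.List.pyRange (15 : Int) 30 1) = PySem.List.pyRange 15 30 1 := by decide
  have hmap : (PySem.List.pyRange (0 : Int) 15 1).map (fun d => 15 + d) = PySem.List.pyRange 15 30 1 := by decide
  have hpw : (PySem.List.pyRange (15 : Int) 30 1).Pairwise (· < ·) := by decide
  show goA walls _ = _
  rw [safe_start_alt]
  simp only [h30, h28, hof]
  rw [fold_diff_filter walls (PySem.List.pyRange 15 30 1),
    min?_of_pairwise_lt _ (hpw.filter _),
    goA_filter walls, hmap]

-- ===== VERDICT (by name: the statement is the Claim_ definition above) =====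
theorem safe_start_spec : Claim_equal_safe_start := by
  intro walls _
  unfold Spec_safe_start
  exact safe_start_eq_alt walls
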